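-- pv_equiv track=rewrite | github.com/marinecourtin/tp-sem-1 | lexicalSubtitution.py | stopword_removal_by_cat
-- ===== SOURCE A (Python) =====
-- def stopword_removal_by_cat (lst, position_center, cats_full) :
--
-- 	"""
-- 	Cette fonction enlève dans la liste d'entrée "lst" tous les mots
-- 	appartenant à des catégories morpho-syntaxiques non-renseignées
-- 	par la liste cats_full.
-- 	lst (list) : liste des données d'entrée
-- 	position_center (int) : l'indice correspondant à la position du mot cible
-- 	cats_full (list(str)) : liste contenant les étiquettes de
-- 	catégorie mophosyntaxique des mots pleins (jeu d'étiquettes par MElt)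
-- 	return (list, int) : le result de la suppression, la position du mot cible dans resultat
-- 	"""
--
-- 	ret = []
-- 	new_position_cursor = 0
-- 	new_position_center = -1
-- 	for position_cursor, elt in enumerate(lst) :
-- 		pos = elt[1]
-- 		if position_cursor == position_center :
-- 			new_position_center = new_position_cursor
-- 		if pos in cats_full :
-- 			ret.append(elt)
-- 			new_position_cursor += 1
-- 	return ret, new_position_center
-- ===== SOURCE B (Python) =====
-- def stopword_removal_by_cat(lst, position_center, cats_full):
--     ret = [e for e in lst if e[1] in cats_full]
--     new_position_center = -1
--     if 0 <= position_center < len(lst):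
--         new_position_center = sum(1 for e in lst[:position_center] if e[1] in cats_full)
--     return ret, new_position_center
-- ===== Notes on version B (the rewrite author's own statement) =====
-- stated objective: simpler
-- what changed: Replaces A's single interleaved loop that threads a kept-count cursor and captures it at the target index with two independent passes: a filtering comprehension for the result list, plus a guarded prefix count over lst[:position_center] for the new target position.
import Mathlib
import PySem

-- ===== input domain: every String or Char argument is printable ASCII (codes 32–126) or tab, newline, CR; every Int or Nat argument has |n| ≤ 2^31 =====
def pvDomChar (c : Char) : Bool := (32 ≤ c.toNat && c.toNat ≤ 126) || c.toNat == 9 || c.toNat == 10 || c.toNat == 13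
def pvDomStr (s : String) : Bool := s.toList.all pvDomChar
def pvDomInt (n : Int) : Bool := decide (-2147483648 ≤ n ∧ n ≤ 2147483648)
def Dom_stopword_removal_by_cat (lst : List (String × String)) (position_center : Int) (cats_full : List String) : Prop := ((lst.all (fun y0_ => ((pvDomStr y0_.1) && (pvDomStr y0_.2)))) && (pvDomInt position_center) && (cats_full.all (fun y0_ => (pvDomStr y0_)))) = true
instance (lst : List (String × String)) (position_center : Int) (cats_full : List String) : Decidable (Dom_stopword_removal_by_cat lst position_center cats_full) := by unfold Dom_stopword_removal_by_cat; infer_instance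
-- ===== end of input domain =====

-- B replaces A's single interleaved loop (cursor + centre threaded together) by two independent
-- passes: a filter for the result and a guarded prefix count for the new centre position (simpler).

-- ===== PORT A =====
-- literal port of A: one foldl over enumerate(lst) threading (ret, new_position_cursor, new_position_center)
def stopword_removal_by_cat (lst : List (String × String)) (position_center : Int) (cats_full : List String) : (List (String × String)) × Int :=
  let r := (PySem.List.enumerate lst 0).foldl
    (fun (st : List (String × String) × Int × Int) (pe : Int × (String × String)) =>
      let pos := pe.2.2
      let cen := if pe.1 = position_center then st.2.1 else st.2.2
      if cats_full.contains pos then (st.1 ++ [pe.2], st.2.1 + 1, cen) else (st.1, st.2.1, cen))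
    ([], 0, -1)
  (r.1, r.2.2)

-- ===== PORT B =====
-- literal port of Source B: filter comprehension, then a guarded count over the slice lst[:position_center]
-- (the 0/1 generator sum is countP)
def stopword_removal_by_cat_alt (lst : List (String × String)) (position_center : Int) (cats_full : List String) : (List (String × String)) × Int :=
  let ret := lst.filter (fun e => cats_full.contains e.2)
  let new_position_center : Int :=
    if 0 ≤ position_center ∧ position_center < (lst.length : Int) then
      ((PySem.List.slice lst none (some position_center)).countP (fun e => cats_full.contains e.2) : Int)
    else -1
  (ret, new_position_center)

-- ===== PRECONDITION & SPEC =====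
def Spec_stopword_removal_by_cat (lst : List (String × String)) (position_center : Int) (cats_full : List String) (out : (List (String × String)) × Int) : Prop := out = stopword_removal_by_cat_alt lst position_center cats_full
instance (lst : List (String × String)) (position_center : Int) (cats_full : List String) (out : (List (String × String)) × Int) : Decidable (Spec_stopword_removal_by_cat lst position_center cats_full out) := by unfold Spec_stopword_removal_by_cat; infer_instance

-- ===== CLAIM (what is proved, stated in full; the proofs are below) =====
def Claim_equal_stopword_removal_by_cat : Prop := ∀ (lst : List (String × String)) (position_center : Int) (cats_full : List String), Dom_stopword_removal_by_cat lst position_center cats_full → Spec_stopword_removal_by_cat lst position_center cats_full (stopword_removal_by_cat lst position_center cats_full)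

-- ===== LEMMAS AND PROOFS =====

-- loop invariant for A's fold, generalized over the predicate, the enumerate start and the accumulator
theorem srbc_fold_spec {a : Type} (p : a → Bool) (pc : Int) (lst : List a)
    (s : Int) (r : List a) (cur cen : Int) :
    (PySem.List.enumerate lst s).foldl
      (fun (st : List a × Int × Int) (pe : Int × a) =>
        let c := if pe.1 = pc then st.2.1 else st.2.2
        if p pe.2 then (st.1 ++ [pe.2], st.2.1 + 1, c) else (st.1, st.2.1, c))
      (r, cur, cen)
    = (r ++ lst.filter p,
       cur + (lst.countP p : Int),
       if s ≤ pc ∧ pc < s + lst.length then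
         cur + ((lst.take (pc - s).toNat).countP p : Int)
       else cen) := by
  induction lst generalizing s r cur cen with
  | nil => simp
  | cons x xs ih =>
    rw [PySem.List.enumerate_cons, List.foldl_cons]
    have hlen : (((x :: xs).length : Nat) : Int) = (xs.length : Int) + 1 := by
      push_cast [List.length_cons]; ring
    by_cases hp : p x
    · simp only [hp, if_true]
      rw [ih, List.filter_cons_of_pos hp, List.countP_cons_of_pos hp]
      refine Prod.ext (by simp) (Prod.ext (by push_cast; ring) ?_)
      split_ifs with h1 h2 h3 h4 h5 <;>
          first
          | rfl
          | omega
          | (have ht : (pc - s).toNat = (pc - (s + 1)).toNat + 1 := by omega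
             rw [ht, List.take_succ_cons, List.countP_cons_of_pos hp]
             push_cast; ring)
          | (have h0 : (pc - s).toNat = 0 := by omega
             rw [h0, List.take_zero, List.countP_nil]
             push_cast; ring)
    · simp only [hp, if_false, Bool.false_eq_true]
      rw [ih, List.filter_cons_of_neg (by simpa using hp), List.countP_cons_of_neg (by simpa using hp)]
      refine Prod.ext rfl (Prod.ext rfl ?_)
      split_ifs with h1 h2 h3 h4 h5 <;>
          first
          | rfl
          | omega
          | (have ht : (pc - s).toNat = (pc - (s + 1)).toNat + 1 := by omega
             rw [ht, List.take_succ_cons, List.countP_cons_of_neg (by simpa using hp)])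
          | (have h0 : (pc - s).toNat = 0 := by omega
             rw [h0, List.take_zero, List.countP_nil]
             push_cast; ring)

-- ===== VERDICT (by name: the statement is the Claim_ definition above) =====
theorem stopword_removal_by_cat_spec : Claim_equal_stopword_removal_by_cat := by
  intro lst pc cats _
  unfold Spec_stopword_removal_by_cat stopword_removal_by_cat stopword_removal_by_cat_alt
  have hfold := srbc_fold_spec (fun e : String × String => cats.contains e.2) pc lst 0 [] 0 (-1)
  dsimp only at hfold ⊢
  rw [hfold]
  split_ifs with h1 h2 h2
  · rw [PySem.List.slice_to]
    · simp
    · exact h2.1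
  · exact absurd ⟨h1.1, by omega⟩ h2
  · exact absurd ⟨h2.1, by omega⟩ h1
  · simp
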